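-- pv_equiv track=rewrite | github.com/tomerni/PythonProjects | wordsearch.py | search_down_col
-- ===== SOURCE A (Python) =====
-- def search_down_col(word, col):
--     """
--     Searches the word in the given column downward
--     :param word: The word that is being searched
--     :param col: The column that is being checked
--     :return: The word appears number
--     """
--     appears_counter = 0
--     current_row = 0
--     # Running until the word is longer then the rows reminded
--     while current_row <= len(col) - len(word):
--         correct_letters_counter = 0
--         # Checking every letter of the word
--         for index in range(current_row, current_row + len(word)):
--             # Correct word
--             if col[index] == word[correct_letters_counter]:
--                 correct_letters_counter += 1
--             # Incorrect word
--             else: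
--                 break
--         # Found 1 appearance of the word
--         if correct_letters_counter == len(word):
--             appears_counter += 1
--             current_row += 1
--         else:
--             current_row += 1
--     return appears_counter
-- ===== SOURCE B (Python) =====
-- def search_down_col(word, col):
--     """Count appearances of word read downward in the column.
--
--     Pattern-major traversal: keep the list of surviving candidate start
--     rows and filter it once per letter of the word, instead of re-scanning
--     the word letter by letter at every start row.
--     """
--     m = len(word)
--     candidates = list(range(len(col) - m + 1))
--     for j in range(m):
--         ch = word[j]
--         candidates = [i for i in candidates if col[i + j] == ch]
--     return len(candidates)
-- ===== Notes on version B (the rewrite author's own statement) =====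
-- stated objective: alternative
-- what changed: B inverts the loop nesting: instead of rescanning the word letter by letter at each start row with a match counter and break, it keeps the list of surviving candidate start rows and filters it once per word position.
import Mathlib
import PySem

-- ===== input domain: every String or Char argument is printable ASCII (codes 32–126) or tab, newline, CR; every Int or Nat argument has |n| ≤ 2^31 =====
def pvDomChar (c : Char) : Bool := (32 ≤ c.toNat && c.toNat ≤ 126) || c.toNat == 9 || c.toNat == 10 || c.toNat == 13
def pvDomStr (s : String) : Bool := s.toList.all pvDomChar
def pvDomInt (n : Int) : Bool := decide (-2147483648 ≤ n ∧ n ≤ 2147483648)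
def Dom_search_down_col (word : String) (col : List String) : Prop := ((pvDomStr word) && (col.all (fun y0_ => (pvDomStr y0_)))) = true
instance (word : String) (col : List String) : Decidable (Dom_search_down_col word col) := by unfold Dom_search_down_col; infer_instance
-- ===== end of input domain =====

-- B replaces A's row-major rescanning loop by a pattern-major candidate filter (alternative decomposition, same worst-case cost).

-- ===== PORT A =====
-- inner 'for index in range(...)' loop with its break and the letter counter
def pvInnerA (col : List String) (word : String) : List Int → Int → Int
  | [], c => c
  | idx :: rest, c =>
    if PySem.List.pyGet? col idx = (PySem.Str.pyGet? word c).map (fun ch => String.ofList [ch])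
    then pvInnerA col word rest (c + 1)
    else c

def search_down_col (word : String) (col : List String) : Int :=
  (PySem.List.pyRange 0 ((col.length : Int) - PySem.Str.len word + 1) 1).foldl
    (fun appears r =>
      if pvInnerA col word (PySem.List.pyRange r (r + PySem.Str.len word) 1) 0 = PySem.Str.len word
      then appears + 1 else appears) 0

-- ===== PORT B =====
def search_down_col_alt (word : String) (col : List String) : Int :=
  (((PySem.List.pyRange 0 (PySem.Str.len word) 1).foldl
      (fun cands j => cands.filter (fun i =>
        PySem.List.pyGet? col (i + j) == (PySem.Str.pyGet? word j).map (fun ch => String.ofList [ch])))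
      (PySem.List.pyRange 0 ((col.length : Int) - PySem.Str.len word + 1) 1)).length : Int)

-- ===== PRECONDITION & SPEC =====
def Spec_search_down_col (word : String) (col : List String) (out : Int) : Prop := out = search_down_col_alt word col
instance (word : String) (col : List String) (out : Int) : Decidable (Spec_search_down_col word col out) := by unfold Spec_search_down_col; infer_instance

-- ===== CLAIM (what is proved, stated in full; the proofs are below) =====
def Claim_equal_search_down_col : Prop := ∀ (word : String) (col : List String), Dom_search_down_col word col → Spec_search_down_col word col (search_down_col word col)

-- ===== LEMMAS AND PROOFS =====

-- the letter comparison both programs perform at start row i, word position j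
def pvCmp (word : String) (col : List String) (i j : Int) : Bool :=
  PySem.List.pyGet? col (i + j) == (PySem.Str.pyGet? word j).map (fun ch => String.ofList [ch])

lemma pvLen_nonneg (word : String) : 0 ≤ PySem.Str.len word := by
  simp [PySem.Str.len_eq]

-- A's inner loop reaches the full word length iff every remaining position matches
lemma pvInnerA_key (word : String) (col : List String) (r : Int) :
    ∀ (n : Nat) (j : Int), j + n = PySem.Str.len word →
    (pvInnerA col word (PySem.List.pyRange (r + j) (r + PySem.Str.len word) 1) j
        = PySem.Str.len word
      ↔ ∀ t : Int, j ≤ t → t < PySem.Str.len word → pvCmp word col r t = true) := by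
  intro n
  induction n with
  | zero =>
    intro j hj
    rw [PySem.List.pyRange_one_eq_nil (by omega)]
    simp only [pvInnerA]
    constructor
    · intro _ t ht1 ht2; omega
    · intro _; omega
  | succ n ih =>
    intro j hj
    rw [PySem.List.pyRange_one_cons (by omega)]
    simp only [pvInnerA]
    by_cases hc : PySem.List.pyGet? col (r + j)
        = (PySem.Str.pyGet? word j).map (fun ch => String.ofList [ch])
    · rw [if_pos hc]
      have hrw : r + j + 1 = r + (j + 1) := by ring
      rw [hrw]
      rw [ih (j + 1) (by omega)]
      constructor
      · intro h t ht1 ht2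
        rcases eq_or_lt_of_le ht1 with he | hlt
        · simpa [pvCmp, ← he] using hc
        · exact h t (by omega) ht2
      · intro h t ht1 ht2
        exact h t (by omega) ht2
    · rw [if_neg hc]
      constructor
      · intro h; omega
      · intro h
        exfalso
        have := h j le_rfl (by omega)
        rw [pvCmp, beq_iff_eq] at this
        exact hc this
    
-- B's candidate-filtering fold is one filter by "all remaining positions match"
lemma pvFoldB_key (word : String) (col : List String) :
    ∀ (n : Nat) (lo : Int) (xs : List Int), lo + n = PySem.Str.len word →
    (PySem.List.pyRange lo (PySem.Str.len word) 1).foldl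
        (fun cands j => cands.filter (fun i => pvCmp word col i j)) xs
      = xs.filter (fun i =>
          (PySem.List.pyRange lo (PySem.Str.len word) 1).all (fun t => pvCmp word col i t)) := by
  intro n
  induction n with
  | zero =>
    intro lo xs hlo
    rw [PySem.List.pyRange_one_eq_nil (by omega)]
    simp
  | succ n ih =>
    intro lo xs hlo
    rw [PySem.List.pyRange_one_cons (by omega)]
    simp only [List.foldl_cons, List.all_cons]
    rw [ih (lo + 1) _ (by omega)]
    rw [List.filter_filter]
    apply List.filter_congr
    intro i _
    exact Bool.and_comm _ _

theorem pv_main (word : String) (col : List String) :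
    search_down_col word col = search_down_col_alt word col := by
  have hm : 0 ≤ PySem.Str.len word := pvLen_nonneg word
  have hall : ∀ r : Int,
      (pvInnerA col word (PySem.List.pyRange r (r + PySem.Str.len word) 1) 0
          = PySem.Str.len word)
        ↔ ((PySem.List.pyRange 0 (PySem.Str.len word) 1).all
            (fun t => pvCmp word col r t) = true) := by
    intro r
    have := pvInnerA_key word col r (PySem.Str.len word).toNat 0 (by omega)
    rw [show r + (0 : Int) = r by ring] at this
    rw [this]
    constructor
    · intro h
      rw [List.all_eq_true]
      intro t ht
      rw [PySem.List.mem_pyRange_one] at ht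
      exact h t ht.1 ht.2
    · intro h t ht1 ht2
      rw [List.all_eq_true] at h
      exact h t (by rw [PySem.List.mem_pyRange_one]; exact ⟨ht1, ht2⟩)
  unfold search_down_col search_down_col_alt
  have hfun : (fun (appears : Int) (r : Int) =>
        if pvInnerA col word (PySem.List.pyRange r (r + PySem.Str.len word) 1) 0
            = PySem.Str.len word
        then appears + 1 else appears)
      = (fun (appears : Int) (r : Int) =>
        if (PySem.List.pyRange 0 (PySem.Str.len word) 1).all (fun t => pvCmp word col r t) = true
        then appears + 1 else appears) := by
    funext a r
    exact if_congr (hall r) rfl rfl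
  rw [hfun]
  rw [show (fun cands j => cands.filter (fun i =>
        PySem.List.pyGet? col (i + j) == (PySem.Str.pyGet? word j).map (fun ch => String.ofList [ch])))
      = (fun (cands : List Int) (j : Int) => cands.filter (fun i => pvCmp word col i j)) from rfl]
  rw [pvFoldB_key word col (PySem.Str.len word).toNat 0 _ (by omega)]
  rw [PySem.List.foldl_ite_add_one]
  rw [List.countP_eq_length_filter, zero_add]
  congr 2
  apply List.filter_congr
  intro i _
  rw [Bool.eq_iff_iff, decide_eq_true_eq, List.all_eq_true]

-- ===== VERDICT (by name: the statement is the Claim_ definition above) =====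
theorem search_down_col_spec : Claim_equal_search_down_col := by
  intro word col _
  unfold Spec_search_down_col
  exact pv_main word col
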